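-- pv_equiv track=rewrite | github.com/himanshi1124/PALB-1-Python-Programming | Experiment List 23-02-2026 To 1-03-2026/Ques6.9.3.py | countBalanced
-- ===== SOURCE A (Python) =====
-- def countBalanced(arr):
--     vowels = set('aeiou')
--
--     prefix = 0
--     freq = {0: 1}
--     result = 0
--
--     for word in arr:
--         diff = 0
--         for ch in word:
--             if ch in vowels:
--                 diff += 1
--             else:
--                 diff -= 1
--
--         prefix += diff
--
--         if prefix in freq:
--             result += freq[prefix]
--             freq[prefix] += 1
--         else:
--             freq[prefix] = 1
--
--     return result
-- ===== SOURCE B (Python) =====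
-- def countBalanced(arr):
--     vowels = set('aeiou')
--
--     # Collect all running prefix balances, including the empty prefix 0.
--     prefixes = [0]
--     p = 0
--     for word in arr:
--         for ch in word:
--             p += 1 if ch in vowels else -1
--         prefixes.append(p)
--
--     # Sort, then count equal pairs by scanning runs of equal values:
--     # the k-th repeat of a value pairs with the k earlier copies in its run.
--     prefixes.sort()
--     total = 0
--     run = 1
--     prev = prefixes[0]
--     for x in prefixes[1:]:
--         if x == prev:
--             total += run
--             run += 1
--         else:
--             run = 1
--         prev = x
--     return total
-- ===== Notes on version B (the rewrite author's own statement) =====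
-- stated objective: alternative
-- what changed: B drops the hash-map entirely: it collects all prefix balances into a list, sorts it, and counts equal pairs with a run-length scan over adjacent equal values, instead of A's one-pass dict of counts.
import Mathlib
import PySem

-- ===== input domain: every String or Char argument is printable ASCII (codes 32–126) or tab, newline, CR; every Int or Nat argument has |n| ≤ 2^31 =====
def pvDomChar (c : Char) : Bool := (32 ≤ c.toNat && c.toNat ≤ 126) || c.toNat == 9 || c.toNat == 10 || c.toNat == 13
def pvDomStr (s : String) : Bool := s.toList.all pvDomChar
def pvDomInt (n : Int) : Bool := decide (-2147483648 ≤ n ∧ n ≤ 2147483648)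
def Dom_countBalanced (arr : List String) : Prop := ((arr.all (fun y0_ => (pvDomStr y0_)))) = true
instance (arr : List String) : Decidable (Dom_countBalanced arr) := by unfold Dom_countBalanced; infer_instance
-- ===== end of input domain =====

-- B replaces A's hash-map of prefix-balance counts by a sort of the list of all
-- prefix balances followed by a run-length scan counting adjacent equal pairs.

-- ===== PORT A =====
-- vowels = set('aeiou')  (both Pythons build the same literal set)
def pvVowels : PySem.Set Char := PySem.Set.ofList "aeiou".toList

def countBalanced (arr : List String) : Int :=
  -- prefix = 0; freq = {0: 1}; result = 0; for word in arr: …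
  let st := arr.foldl (fun (s : Int × PySem.Dict Int Int × Int) word =>
    -- diff = 0; for ch in word: diff += 1 if ch in vowels else diff -= 1
    let diff := word.toList.foldl
      (fun d ch => if PySem.Set.contains pvVowels ch then d + 1 else d - 1) 0
    let pfx := s.1 + diff
    match (s.2.1).get? pfx with
    | some c => (pfx, (s.2.1).insert pfx (c + 1), s.2.2 + c)  -- 'prefix in freq' branch
    | none   => (pfx, (s.2.1).insert pfx 1, s.2.2)            -- else branch
    ) (0, (PySem.Dict.empty.insert 0 1), 0)
  st.2.2

-- ===== PORT B =====
def countBalanced_alt (arr : List String) : Int :=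
  -- prefixes = [0]; p = 0; for word: for ch: p += ±1; prefixes.append(p)
  let st := arr.foldl (fun (s : Int × List Int) word =>
    let p := word.toList.foldl
      (fun q ch => q + (if PySem.Set.contains pvVowels ch then 1 else -1)) s.1
    (p, s.2 ++ [p])) (0, [0])
  -- prefixes.sort()
  let prefixes := PySem.List.sorted st.2 (fun x => x) false
  match prefixes with
  | [] => 0  -- unreachable: prefixes always contains the seed 0
  | prev :: rest =>
    -- total = 0; run = 1; prev = prefixes[0]; for x in prefixes[1:]: …
    let fin := rest.foldl (fun (t : Int × Int × Int) x =>
      if x = t.1 then (x, t.2.1 + 1, t.2.2 + t.2.1) else (x, 1, t.2.2)) (prev, 1, 0)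
    fin.2.2

-- ===== PRECONDITION & SPEC =====
def Spec_countBalanced (arr : List String) (out : Int) : Prop := out = countBalanced_alt arr
instance (arr : List String) (out : Int) : Decidable (Spec_countBalanced arr out) := by unfold Spec_countBalanced; infer_instance

-- ===== CLAIM (what is proved, stated in full; the proofs are below) =====
def Claim_equal_countBalanced : Prop := ∀ (arr : List String), Dom_countBalanced arr → Spec_countBalanced arr (countBalanced arr)

-- ===== LEMMAS AND PROOFS =====

-- A's per-word balance (diff computed from 0)
def pvBal (w : String) : Int :=
  w.toList.foldl (fun d ch => if PySem.Set.contains pvVowels ch then d + 1 else d - 1) 0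

-- the sequence of running prefix balances produced from start value p
def pvPrefList : Int → List String → List Int
  | _, [] => []
  | p, w :: t => (p + pvBal w) :: pvPrefList (p + pvBal w) t

-- number of equal-valued pairs of positions in a list (each unordered pair once)
def pvPc : List Int → Int
  | [] => 0
  | x :: xs => (xs.count x : Int) + pvPc xs

lemma pvPc_append_singleton (S : List Int) (x : Int) :
    pvPc (S ++ [x]) = pvPc S + (S.count x : Int) := by
  induction S with
  | nil => simp [pvPc]
  | cons a t ih =>
    simp only [List.cons_append, pvPc, ih, List.count_append, List.count_cons,
      List.count_nil]
    by_cases h : x = a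
    · subst h; simp; ring
    · simp [h, Ne.symm h]; ring

lemma pvPc_perm {l l' : List Int} (h : l.Perm l') : pvPc l = pvPc l' := by
  induction h with
  | nil => rfl
  | cons a h ih => simp only [pvPc, ih, h.count_eq]
  | swap a b l =>
    simp only [pvPc, List.count_cons]
    by_cases h : a = b
    · subst h; ring
    · simp only [beq_iff_eq, h, Ne.symm h, if_false]
      push_cast
      ring
  | trans _ _ ih1 ih2 => exact ih1.trans ih2

-- A's 'diff from 0 then prefix += diff' equals B's fold of the prefix through the word
lemma pvPrefix_eq (w : String) (p : Int) :
    p + pvBal w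
    = w.toList.foldl
        (fun q ch => q + (if PySem.Set.contains pvVowels ch then 1 else -1)) p := by
  have hsh : (fun (d : Int) ch => if PySem.Set.contains pvVowels ch then d + 1 else d - 1)
      = (fun (d : Int) ch => d + (if PySem.Set.contains pvVowels ch then 1 else -1)) := by
    funext d ch
    split <;> ring
  rw [pvBal, hsh, PySem.List.foldl_add, PySem.List.foldl_add]
  ring

-- A's loop invariant: the dict is the counter of the seen prefixes S (seed included)
-- and the running result is the pair count of S
lemma pvALoop (ws : List String) (p r : Int) (d : PySem.Dict Int Int) (S : List Int)
    (hd : ∀ v, d.getD v 0 = (S.count v : Int)) (hr : r = pvPc S) :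
    (ws.foldl (fun (s : Int × PySem.Dict Int Int × Int) word =>
      let diff := word.toList.foldl
        (fun d ch => if PySem.Set.contains pvVowels ch then d + 1 else d - 1) 0
      let pfx := s.1 + diff
      match (s.2.1).get? pfx with
      | some c => (pfx, (s.2.1).insert pfx (c + 1), s.2.2 + c)
      | none   => (pfx, (s.2.1).insert pfx 1, s.2.2)) (p, d, r)).2.2
    = pvPc (S ++ pvPrefList p ws) := by
  induction ws generalizing p r d S with
  | nil => simpa [pvPrefList] using hr
  | cons w t ih =>
    simp only [List.foldl_cons, pvPrefList]
    have hb : List.foldl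
        (fun d ch => if PySem.Set.contains pvVowels ch then d + 1 else d - 1)
        0 w.toList = pvBal w := rfl
    rw [hb]
    set P := p + pvBal w with hP
    have hgetD : d.getD P 0 = (S.count P : Int) := hd P
    have hstep : ∀ (c' : Int), d.getD P 0 = c' →
        ∀ v, (d.insert P (c' + 1)).getD v 0 = (((S ++ [P]).count v : Nat) : Int) := by
      intro c' hc' v
      by_cases hv : v = P
      · subst hv
        rw [PySem.Dict.getD_insert_self, ← hc', hd P]
        simp [List.count_append]
      · rw [PySem.Dict.getD_insert_of_ne _ _ _ hv, hd v]
        simp [List.count_append, Ne.symm hv]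
    cases h : d.get? P with
    | some c =>
      have hc : d.getD P 0 = c := PySem.Dict.getD_of_get?_eq_some d 0 h
      have := ih P (r + c) (d.insert P (c + 1)) (S ++ [P]) (hstep c hc)
        (by rw [pvPc_append_singleton, hr, ← hc, hgetD])
      simpa [List.append_assoc] using this
    | none =>
      have hc : d.getD P 0 = 0 := PySem.Dict.getD_of_get?_eq_none d 0 h
      have := ih P r (d.insert P 1) (S ++ [P])
        (by simpa using hstep 0 hc)
        (by rw [pvPc_append_singleton, hr, ← hgetD, hc]; ring)
      simpa [List.append_assoc] using this

-- B's first loop builds exactly acc ++ pvPrefList p ws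
lemma pvBLoop1 (ws : List String) (p : Int) (acc : List Int) :
    (ws.foldl (fun (s : Int × List Int) word =>
      let q := word.toList.foldl
        (fun q ch => q + (if PySem.Set.contains pvVowels ch then 1 else -1)) s.1
      (q, s.2 ++ [q])) (p, acc)).2 = acc ++ pvPrefList p ws := by
  induction ws generalizing p acc with
  | nil => simp [pvPrefList]
  | cons w t ih =>
    simp only [List.foldl_cons, pvPrefList]
    rw [← pvPrefix_eq w p, ih]
    simp

-- B's run-length scan over the rest of a sorted list counts the equal pairs:
-- S is the already-scanned sorted block, prev its maximum and last element,
-- run the multiplicity of prev in S, total the pair count of S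
lemma pvScan (xs : List Int) (S : List Int) (prev run total : Int)
    (hprev : prev ∈ S)
    (hmax : ∀ y ∈ S, y ≤ prev)
    (hrun : run = (S.count prev : Int))
    (htot : total = pvPc S)
    (hpw : (S ++ xs).Pairwise (· ≤ ·)) :
    (xs.foldl (fun (t : Int × Int × Int) x =>
      if x = t.1 then (x, t.2.1 + 1, t.2.2 + t.2.1) else (x, 1, t.2.2))
      (prev, run, total)).2.2 = pvPc (S ++ xs) := by
  induction xs generalizing S prev run total with
  | nil => simpa using htot
  | cons x t ih =>
    have hSx : ∀ y ∈ S, y ≤ x := fun y hy =>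
      (List.pairwise_append.1 hpw).2.2 y hy x List.mem_cons_self
    have hpw' : ((S ++ [x]) ++ t).Pairwise (· ≤ ·) := by
      simpa [List.append_assoc] using hpw
    simp only [List.foldl_cons]
    by_cases hx : x = prev
    · subst hx
      have hmax' : ∀ y ∈ S ++ [x], y ≤ x := by
        intro y hy
        rcases List.mem_append.1 hy with h | h
        · exact hSx y h
        · simp only [List.mem_singleton] at h; omega
      have := ih (S ++ [x]) x (run + 1) (total + run)
        (by simp) hmax'
        (by simp [List.count_append, hrun])
        (by rw [pvPc_append_singleton, htot, hrun])
        hpw'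
      simpa [List.append_assoc] using this
    · have hxS : x ∉ S := fun hmem => by
        have h1 := hmax x hmem
        have h2 := hSx prev hprev
        omega
      have hcnt : S.count x = 0 := List.count_eq_zero.2 hxS
      have hmax' : ∀ y ∈ S ++ [x], y ≤ x := by
        intro y hy
        rcases List.mem_append.1 hy with h | h
        · exact le_trans (hmax y h) (hSx prev hprev)
        · simp only [List.mem_singleton] at h; omega
      have := ih (S ++ [x]) x 1 total
        (by simp) hmax'
        (by simp [List.count_append, hcnt])
        (by rw [pvPc_append_singleton, hcnt, htot]; simp)
        hpw'
      simpa [List.append_assoc, hx] using this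

-- ===== VERDICT (by name: the statement is the Claim_ definition above) =====
theorem countBalanced_spec : Claim_equal_countBalanced := by
  intro arr _
  unfold Spec_countBalanced countBalanced countBalanced_alt
  dsimp only
  -- A's side equals the pair count of the seeded prefix list
  have hA : (arr.foldl (fun (s : Int × PySem.Dict Int Int × Int) word =>
      let diff := word.toList.foldl
        (fun d ch => if PySem.Set.contains pvVowels ch then d + 1 else d - 1) 0
      let pfx := s.1 + diff
      match (s.2.1).get? pfx with
      | some c => (pfx, (s.2.1).insert pfx (c + 1), s.2.2 + c)
      | none   => (pfx, (s.2.1).insert pfx 1, s.2.2))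
      (0, (PySem.Dict.empty.insert 0 1), 0)).2.2
      = pvPc ([0] ++ pvPrefList 0 arr) := by
    apply pvALoop
    · intro v
      by_cases hv : v = 0
      · subst hv; simp [PySem.Dict.getD_insert_self]
      · rw [PySem.Dict.getD_insert_of_ne _ _ _ hv]
        simp [pysem, Ne.symm hv]
    · rfl
  -- B's first loop builds the same prefix list
  have hB1 : (arr.foldl (fun (s : Int × List Int) word =>
      let q := word.toList.foldl
        (fun q ch => q + (if PySem.Set.contains pvVowels ch then 1 else -1)) s.1
      (q, s.2 ++ [q])) (0, [0])).2 = [0] ++ pvPrefList 0 arr := pvBLoop1 arr 0 [0]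
  set L0 : List Int := [0] ++ pvPrefList 0 arr with hL0
  rw [hA, hB1]
  have hperm : (PySem.List.sorted L0 (fun x => x) false).Perm L0 :=
    PySem.List.sorted_perm L0 (fun x => x) false
  have hpw : (PySem.List.sorted L0 (fun x => x) false).Pairwise (· ≤ ·) :=
    PySem.List.sorted_pairwise L0 (fun x => x)
  cases hs : PySem.List.sorted L0 (fun x => x) false with
  | nil =>
    rw [hs] at hperm
    exact absurd hperm.symm.eq_nil (by simp [hL0])
  | cons prev rest =>
    rw [hs] at hperm hpw
    have hscan := pvScan rest [prev] prev 1 0 (by simp) (by simp)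
      (by simp) (by simp [pvPc]) (by simpa using hpw)
    simp only [List.singleton_append] at hscan
    dsimp only
    rw [hscan]
    exact (pvPc_perm hperm).symm
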